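-- pv_equiv track=rewrite | github.com/t0m3kz/infrahub-demo | transforms/topology_cabling.py | _parse_remote_info
-- ===== SOURCE A (Python) =====
-- def _parse_remote_info(remote_part: str) -> tuple[str, str]:
--     """Parse remote device and interface from display_label part.
--
--     Format: remote_device-remote_interface
--     Must find the boundary where device name ends and interface begins.
--     Typically interface starts with uppercase after a hyphen.
--
--     For example:
--     - "dc-1-fab1-pod1-spine-01-Ethernet1/31" -> ("dc-1-fab1-pod1-spine-01", "Ethernet1/31")
--     - "leaf-01-Eth1/1" -> ("leaf-01", "Eth1/1")
--
--     Args: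
--         remote_part: String in format "device-interface" or similar
--
--     Returns:
--         Tuple of (device_name, interface_name) or ("", "") if parse fails
--     """
--     if not remote_part or "-" not in remote_part:
--         return "", ""
--
--     # Find the last hyphen followed by an uppercase letter (start of interface)
--     for i in range(len(remote_part) - 1, 0, -1):
--         if (
--             remote_part[i] == "-"
--             and i + 1 < len(remote_part)
--             and remote_part[i + 1].isupper()
--         ):
--             device = remote_part[:i]
--             interface = remote_part[i + 1 :]
--             return device, interface
--
--     # Fallback: split on first hyphen
--     parts = remote_part.split("-", 1)
--     return parts[0], parts[1] if len(parts) > 1 else ""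
-- ===== SOURCE B (Python) =====
-- def _split_tokens(parts):
--     """Split the token list at the LAST token that starts with an uppercase
--     letter, returning (left, right), or None if there is no such token."""
--     if not parts:
--         return None
--     tail = _split_tokens(parts[1:])
--     if tail is not None:
--         left, right = tail
--         return [parts[0]] + left, right
--     if parts[0] and parts[0][0].isupper():
--         return [], parts
--     return None
--
--
-- def _parse_remote_info(remote_part: str) -> tuple[str, str]:
--     """Tokenize on '-' and split the tokens at the last one that starts
--     with an uppercase letter (the interface); rejoin both halves."""
--     if not remote_part or "-" not in remote_part:
--         return "", ""
--     first, *rest = remote_part.split("-")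
--     found = _split_tokens(rest)
--     if found is None:
--         return first, "-".join(rest)
--     left, right = found
--     return "-".join([first] + left), "-".join(right)
-- ===== Notes on version B (the rewrite author's own statement) =====
-- stated objective: alternative
-- what changed: B tokenizes the string at hyphens and recursively splits the token list at the last token that starts with an uppercase letter, instead of A's backward character-index scan for a hyphen followed by an uppercase letter.
import Mathlib
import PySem

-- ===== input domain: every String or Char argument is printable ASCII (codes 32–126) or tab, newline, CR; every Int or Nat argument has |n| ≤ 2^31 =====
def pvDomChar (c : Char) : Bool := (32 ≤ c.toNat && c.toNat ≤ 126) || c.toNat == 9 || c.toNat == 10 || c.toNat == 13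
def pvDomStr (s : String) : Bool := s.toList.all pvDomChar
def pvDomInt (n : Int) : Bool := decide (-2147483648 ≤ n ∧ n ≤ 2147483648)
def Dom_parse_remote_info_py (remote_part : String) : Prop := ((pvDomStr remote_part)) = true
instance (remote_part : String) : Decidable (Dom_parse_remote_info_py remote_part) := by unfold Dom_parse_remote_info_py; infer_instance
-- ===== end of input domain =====

-- B re-implements the split by tokenizing on '-' and recursively splitting the token
-- list at the last uppercase-initial token (objective: alternative decomposition,
-- tokens instead of a backward character-index scan); same return value everywhere.

-- ===== PORT A =====
-- loop condition of A: remote_part[i] == "-" and i+1 < len(remote_part) and remote_part[i+1].isupper()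
def pvCondA (s : List Char) (i : Nat) : Bool :=
  (PySem.List.pyGetD s (i : Int) ' ' == '-') && decide (i + 1 < s.length) &&
    PySem.Chars.isupper (PySem.List.pyGetD s ((i + 1 : Nat) : Int) ' ')

-- for i in range(len(remote_part)-1, 0, -1): first i (counting down, stopping before 0) where the condition holds
def pvLoopA (s : List Char) : Nat → Option Nat
  | 0 => none
  | k + 1 => if pvCondA s (k + 1) then some (k + 1) else pvLoopA s k

def parse_remote_info_py (remote_part : String) : String × String :=
  let cs := remote_part.toList
  if cs = [] ∨ PySem.Chars.isIn ['-'] cs = false then ("", "")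
  else
    match pvLoopA cs (cs.length - 1) with
    | some i =>
        (String.ofList (PySem.List.slice cs none (some (i : Int))),
         String.ofList (PySem.List.slice cs (some ((i + 1 : Nat) : Int)) none))
    | none =>
        let parts := PySem.Chars.splitOnMax cs ['-'] 1
        (String.ofList (PySem.List.pyGetD parts 0 []),
         if 1 < parts.length then String.ofList (PySem.List.pyGetD parts 1 []) else "")

-- ===== PORT B =====
-- B's test: parts[0] and parts[0][0].isupper()
def pvGoodTok (t : List Char) : Bool :=
  match t with
  | [] => false
  | c :: _ => PySem.Chars.isupper c

-- B's recursive helper _split_tokens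
def pvSplitTokens : List (List Char) → Option (List (List Char) × List (List Char))
  | [] => none
  | t :: ts =>
    match pvSplitTokens ts with
    | some (l, r) => some (t :: l, r)
    | none => if pvGoodTok t then some ([], t :: ts) else none

def parse_remote_info_py_alt (remote_part : String) : String × String :=
  let cs := remote_part.toList
  if cs = [] ∨ PySem.Chars.isIn ['-'] cs = false then ("", "")
  else
    let parts := PySem.Chars.splitOn cs ['-']
    let first := parts.headD []
    let rest := parts.tail
    match pvSplitTokens rest with
    | none => (String.ofList first, String.ofList (PySem.Chars.join ['-'] rest))
    | some (l, r) =>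
        (String.ofList (PySem.Chars.join ['-'] (first :: l)),
         String.ofList (PySem.Chars.join ['-'] r))

-- ===== PRECONDITION & SPEC =====
def Spec_parse_remote_info_py (remote_part : String) (out : String × String) : Prop := out = parse_remote_info_py_alt remote_part
instance (remote_part : String) (out : String × String) : Decidable (Spec_parse_remote_info_py remote_part out) := by unfold Spec_parse_remote_info_py; infer_instance

-- ===== CLAIM (what is proved, stated in full; the proofs are below) =====
def Claim_equal_parse_remote_info_py : Prop := ∀ (remote_part : String), Dom_parse_remote_info_py remote_part → Spec_parse_remote_info_py remote_part (parse_remote_info_py remote_part)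

-- ===== LEMMAS AND PROOFS =====

-- reference form of str.split('-') by structural recursion
def pvSp : List Char → List (List Char)
  | [] => [[]]
  | c :: cs =>
    if c = '-' then [] :: pvSp cs
    else
      match pvSp cs with
      | [] => [[c]]
      | t :: ts => (c :: t) :: ts

-- "index i of cs is a hyphen followed by an uppercase letter"
def pvFound (cs : List Char) (i : Nat) : Prop :=
  i + 1 < cs.length ∧ cs.getD i ' ' = '-' ∧ PySem.Chars.isupper (cs.getD (i + 1) ' ') = true

-- split of cs at the LAST pvFound-index, by structural recursion
def pvG : List Char → Option (List Char × List Char)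
  | [] => none
  | c :: cs =>
    match pvG cs with
    | some (d, t) => some (c :: d, t)
    | none => if c = '-' ∧ pvGoodTok cs = true then some ([], cs) else none

lemma pvSp_ne_nil (cs : List Char) : pvSp cs ≠ [] := by
  cases cs with
  | nil => simp [pvSp]
  | cons c cs =>
    simp only [pvSp]
    split_ifs
    · simp
    · cases h : pvSp cs <;> simp

lemma pvSp_hyphen_free (cs : List Char) : ∀ t ∈ pvSp cs, '-' ∉ t := by
  induction cs with
  | nil => simp [pvSp]
  | cons c cs ih =>
    simp only [pvSp]
    split_ifs with hc
    · intro t ht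
      rcases List.mem_cons.1 ht with h | h
      · simp [h]
      · exact ih t h
    · cases h : pvSp cs with
      | nil => exact absurd h (pvSp_ne_nil cs)
      | cons t0 ts =>
        intro t ht
        rcases List.mem_cons.1 ht with h' | h'
        · subst h'
          intro hm
          rcases List.mem_cons.1 hm with h'' | h''
          · exact hc h''.symm
          · exact ih t0 (h ▸ List.mem_cons_self) h''
        · exact ih t (h ▸ List.mem_cons_of_mem t0 h')

lemma pvJoin_pvSp (cs : List Char) : PySem.Chars.join ['-'] (pvSp cs) = cs := by
  induction cs with
  | nil => simp [pvSp, PySem.Chars.join_singleton]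
  | cons c cs ih =>
    simp only [pvSp]
    split_ifs with hc
    · subst hc
      cases h : pvSp cs with
      | nil => exact absurd h (pvSp_ne_nil cs)
      | cons t ts =>
        rw [PySem.Chars.join_cons_cons]
        rw [h] at ih
        simp [ih]
    · cases h : pvSp cs with
      | nil => exact absurd h (pvSp_ne_nil cs)
      | cons t ts =>
        rw [h] at ih
        cases ts with
        | nil =>
          rw [PySem.Chars.join_singleton] at ih ⊢
          simp [ih]
        | cons t2 ts2 =>
          rw [PySem.Chars.join_cons_cons] at ih ⊢
          simp [← ih]

lemma pvSp_decomp (cs : List Char) (h : '-' ∈ cs) :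
    ∃ f R, '-' ∉ f ∧ cs = f ++ '-' :: R ∧ pvSp cs = f :: pvSp R := by
  induction cs with
  | nil => cases h
  | cons c cs ih =>
    by_cases hc : c = '-'
    · subst hc
      exact ⟨[], cs, by simp, by simp, by simp [pvSp]⟩
    · have hmem : '-' ∈ cs := by
        rcases List.mem_cons.1 h with h' | h'
        · exact absurd h'.symm hc
        · exact h'
      obtain ⟨f, R, hf, hcs, hsp⟩ := ih hmem
      refine ⟨c :: f, R, ?_, by simp [hcs], ?_⟩
      · intro hm
        rcases List.mem_cons.1 hm with h' | h'
        · exact hc h'.symm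
        · exact hf h'
      · simp only [pvSp, hc, if_false, hsp]

-- splitOn with separator "-" computes pvSp
lemma pvSplitOn_go_spec : ∀ (fuel : Nat) (l cur : List Char) (acc : List (List Char)),
    l.length < fuel →
    PySem.Chars.splitOn.go ['-'] fuel l cur acc =
      acc.reverse ++ (match pvSp l with
        | [] => []
        | t :: ts => (cur.reverse ++ t) :: ts) := by
  intro fuel
  induction fuel with
  | zero => intro l cur acc h; omega
  | succ fuel ih =>
    intro l cur acc h
    cases l with
    | nil =>
      rw [PySem.Chars.splitOn.go]
      · simp [pvSp]
      · omega
    | cons c rest =>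
      rw [PySem.Chars.splitOn.go.eq_def]
      simp only []
      by_cases hc : c = '-'
      · subst hc
        have hpre : List.isPrefixOf ['-'] ('-' :: rest) = true := by
          simp [List.isPrefixOf]
        simp only [hpre, if_true]
        have : List.drop (['-'] : List Char).length ('-' :: rest) = rest := by simp
        rw [this]
        rw [ih rest [] (cur.reverse :: acc) (by simpa using Nat.lt_of_succ_lt_succ (by simpa using h))]
        cases hsp : pvSp rest with
        | nil => exact absurd hsp (pvSp_ne_nil rest)
        | cons t ts => simp [pvSp, hsp]
      · have hpre : List.isPrefixOf ['-'] (c :: rest) = false := by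
          simp [List.isPrefixOf]
          exact fun h' => absurd h'.symm hc
        simp only [hpre]
        rw [if_neg (by simp)]
        rw [ih rest (c :: cur) acc (by simpa using Nat.lt_of_succ_lt_succ (by simpa using h))]
        cases hsp : pvSp rest with
        | nil => exact absurd hsp (pvSp_ne_nil rest)
        | cons t ts => simp [pvSp, hc, hsp]

lemma pvSplitOn_eq (cs : List Char) : PySem.Chars.splitOn cs ['-'] = pvSp cs := by
  unfold PySem.Chars.splitOn
  rw [pvSplitOn_go_spec (cs.length + 1) cs [] [] (by omega)]
  cases h : pvSp cs with
  | nil => exact absurd h (pvSp_ne_nil cs)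
  | cons t ts => simp

-- splitOnMax with maxsplit 1 splits at the first hyphen
lemma pvSplitOnMax_go_zero : ∀ (fuel : Nat) (l cur : List Char) (acc : List (List Char)),
    PySem.Chars.splitOnMax.go ['-'] fuel 0 l cur acc = acc.reverse ++ [cur.reverse ++ l] := by
  intro fuel l cur acc
  rw [PySem.Chars.splitOnMax.go.eq_def]
  cases fuel with
  | zero => simp
  | succ fuel =>
    cases l with
    | nil => simp
    | cons c rest => simp

lemma pvSplitOnMax_go_one : ∀ (f : List Char), '-' ∉ f → ∀ (R : List Char) (fuel : Nat) (cur : List Char) (acc : List (List Char)),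
    (f ++ '-' :: R).length < fuel →
    PySem.Chars.splitOnMax.go ['-'] fuel 1 (f ++ '-' :: R) cur acc =
      acc.reverse ++ [cur.reverse ++ f, R] := by
  intro f
  induction f with
  | nil =>
    intro _ R fuel cur acc h
    cases fuel with
    | zero => simp at h
    | succ fuel =>
      rw [PySem.Chars.splitOnMax.go.eq_def]
      have hpre : List.isPrefixOf ['-'] ('-' :: R) = true := by simp [List.isPrefixOf]
      simp only [List.nil_append, hpre, if_true]
      rw [if_neg (by omega)]
      have hdrop : List.drop (['-'] : List Char).length ('-' :: R) = R := by simp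
      rw [hdrop, pvSplitOnMax_go_zero]
      simp
  | cons c f ih =>
    intro hf R fuel cur acc h
    cases fuel with
    | zero => simp at h
    | succ fuel =>
      have hc : c ≠ '-' := fun hc => hf (by simp [hc])
      rw [PySem.Chars.splitOnMax.go.eq_def]
      have hpre : List.isPrefixOf ['-'] (c :: (f ++ '-' :: R)) = false := by
        simp [List.isPrefixOf]
        exact fun h' => absurd h'.symm hc
      simp only [List.cons_append, hpre]
      rw [if_neg (by omega), if_neg (by simp)]
      rw [ih (fun hm => hf (List.mem_cons_of_mem c hm)) R fuel (c :: cur) acc (by simp at h ⊢; omega)]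
      simp

lemma pvSplitOnMax_eq (f R : List Char) (hf : '-' ∉ f) :
    PySem.Chars.splitOnMax (f ++ '-' :: R) ['-'] 1 = [f, R] := by
  unfold PySem.Chars.splitOnMax
  rw [if_neg (by norm_num)]
  simp only [Int.toNat_one]
  rw [pvSplitOnMax_go_one f hf R _ [] [] (by omega)]
  simp

-- pvFound shift lemmas
lemma pvFound_cons_succ (c : Char) (cs : List Char) (i : Nat) :
    pvFound (c :: cs) (i + 1) ↔ pvFound cs i := by
  simp [pvFound]

lemma pvFound_cons_zero (c : Char) (cs : List Char) :
    pvFound (c :: cs) 0 ↔ (c = '-' ∧ pvGoodTok cs = true) := by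
  cases cs with
  | nil => simp [pvFound, pvGoodTok]
  | cons c2 cs2 => simp [pvFound, pvGoodTok]

-- pvG specification
lemma pvG_none (cs : List Char) : pvG cs = none ↔ ∀ i, ¬ pvFound cs i := by
  induction cs with
  | nil =>
    simp [pvG, pvFound]
  | cons c cs ih =>
    simp only [pvG]
    cases h : pvG cs with
    | some p =>
      obtain ⟨d, t⟩ := p
      simp only []
      constructor
      · intro h'; cases h'
      · intro hall
        have : ∀ i, ¬ pvFound cs i := fun i hi => hall (i + 1) ((pvFound_cons_succ c cs i).2 hi)
        rw [← ih] at this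
        rw [h] at this
        cases this
    | none =>
      have hall : ∀ i, ¬ pvFound cs i := ih.1 h
      split_ifs with hcond
      · constructor
        · intro h'; cases h'
        · intro hall'
          exact absurd ((pvFound_cons_zero c cs).2 hcond) (hall' 0)
      · constructor
        · intro _ i
          cases i with
          | zero => exact fun hF => hcond ((pvFound_cons_zero c cs).1 hF)
          | succ j => exact fun hF => hall j ((pvFound_cons_succ c cs j).1 hF)
        · intro _; rfl

lemma pvG_some (cs : List Char) : ∀ d t, pvG cs = some (d, t) →
    pvFound cs d.length ∧ d = cs.take d.length ∧ t = cs.drop (d.length + 1) ∧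
      ∀ j, d.length < j → ¬ pvFound cs j := by
  induction cs with
  | nil => intro d t h; cases h
  | cons c cs ih =>
    intro d t h
    simp only [pvG] at h
    cases hg : pvG cs with
    | some p =>
      obtain ⟨d0, t0⟩ := p
      rw [hg] at h
      simp only [Option.some.injEq, Prod.mk.injEq] at h
      obtain ⟨hd, ht⟩ := h
      obtain ⟨hF, hTake, hDrop, hMax⟩ := ih d0 t0 hg
      subst hd; subst ht
      refine ⟨?_, ?_, ?_, ?_⟩
      · simpa [pvFound_cons_succ] using hF
      · simp [List.take_succ_cons, ← hTake]
      · simpa using hDrop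
      · intro j hj
        cases j with
        | zero => omega
        | succ j' =>
          rw [pvFound_cons_succ]
          exact hMax j' (by simpa using hj)
    | none =>
      rw [hg] at h
      split_ifs at h with hcond
      · simp only [Option.some.injEq, Prod.mk.injEq] at h
        obtain ⟨hd, ht⟩ := h
        subst hd; subst ht
        refine ⟨(pvFound_cons_zero c cs).2 hcond, by simp, by simp, ?_⟩
        intro j hj
        cases j with
        | zero => omega
        | succ j' =>
          rw [pvFound_cons_succ]
          exact (pvG_none cs).1 hg j'

-- pvG past a hyphen-free prefix
lemma pvG_prepend (x : List Char) (hx : '-' ∉ x) (z : List Char) :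
    pvG (x ++ z) = match pvG z with
      | some (d, t) => some (x ++ d, t)
      | none => none := by
  induction x with
  | nil =>
    cases h : pvG z with
    | some p => obtain ⟨d, t⟩ := p; simp [h]
    | none => simp [h]
  | cons c x ih =>
    have hc : c ≠ '-' := fun hc => hx (by simp [hc])
    have hx' : '-' ∉ x := fun hm => hx (List.mem_cons_of_mem c hm)
    simp only [List.cons_append, pvG, ih hx']
    cases h : pvG z with
    | some p => obtain ⟨d, t⟩ := p; simp
    | none => simp [hc]

lemma pvGoodTok_append (t z : List Char) :
    pvGoodTok (t ++ '-' :: z) = pvGoodTok t := by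
  cases t with
  | nil => simp [pvGoodTok, PySem.Chars.isupper]
  | cons c t' => simp [pvGoodTok]

-- main bridge: pvG over "pre-tok1-tok2-…" is pvSplitTokens over the tokens
lemma pvSplitTokens_cons (t : List Char) (ts : List (List Char)) :
    pvSplitTokens (t :: ts) = match pvSplitTokens ts with
      | some (l, r) => some (t :: l, r)
      | none => if pvGoodTok t then some ([], t :: ts) else none := rfl

lemma pvG_cons (c : Char) (cs : List Char) :
    pvG (c :: cs) = match pvG cs with
      | some (d, t) => some (c :: d, t)
      | none => if c = '-' ∧ pvGoodTok cs = true then some ([], cs) else none := rfl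

lemma pvMain : ∀ (ts : List (List Char)), ts ≠ [] → (∀ t ∈ ts, '-' ∉ t) →
    ∀ (pre : List Char), '-' ∉ pre →
    pvG (pre ++ '-' :: PySem.Chars.join ['-'] ts) =
      match pvSplitTokens ts with
      | some (l, r) => some (PySem.Chars.join ['-'] (pre :: l), PySem.Chars.join ['-'] r)
      | none => none := by
  intro ts
  induction ts with
  | nil => intro h; cases h rfl
  | cons t1 ts' ih =>
    intro _ hfree pre hpre
    have ht1 : '-' ∉ t1 := hfree t1 List.mem_cons_self
    rw [pvG_prepend pre hpre]
    cases ts' with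
    | nil =>
      rw [PySem.Chars.join_singleton]
      have hG1 : pvG t1 = none := by
        have := pvG_prepend t1 ht1 []
        simpa [pvG] using this
      rw [pvG_cons, hG1, pvSplitTokens_cons t1 []]
      rw [show pvSplitTokens ([] : List (List Char)) = none from rfl]
      by_cases hgood : pvGoodTok t1 = true
      · simp [hgood, PySem.Chars.join_singleton]
      · simp [hgood]
    | cons t2 ts'' =>
      have hJ : PySem.Chars.join ['-'] (t1 :: t2 :: ts'') =
          t1 ++ '-' :: PySem.Chars.join ['-'] (t2 :: ts'') := by
        rw [PySem.Chars.join_cons_cons]; simp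
      have hfree' : ∀ t ∈ t2 :: ts'', '-' ∉ t := fun t ht => hfree t (List.mem_cons_of_mem t1 ht)
      rw [hJ, pvG_cons, ih (by simp) hfree' t1 ht1, pvSplitTokens_cons t1 (t2 :: ts'')]
      cases hs : pvSplitTokens (t2 :: ts'') with
      | some p =>
        obtain ⟨l, r⟩ := p
        have hjoin : PySem.Chars.join ['-'] (pre :: t1 :: l) =
            pre ++ '-' :: PySem.Chars.join ['-'] (t1 :: l) := by
          rw [PySem.Chars.join_cons_cons]; simp
        simp [hjoin]
      | none =>
        rw [pvGoodTok_append]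
        by_cases hgood : pvGoodTok t1 = true
        · simp [hgood, hJ, PySem.Chars.join_singleton]
        · simp [hgood]

lemma pvSplitTokens_nil_left : ∀ (ts r : List (List Char)),
    pvSplitTokens ts = some ([], r) → r = ts := by
  intro ts r h
  cases ts with
  | nil => cases h
  | cons t ts' =>
    rw [pvSplitTokens_cons] at h
    cases hg : pvSplitTokens ts' with
    | some p =>
      obtain ⟨l, r0⟩ := p
      rw [hg] at h
      simp at h
    | none =>
      rw [hg] at h
      by_cases hgood : pvGoodTok t = true
      · rw [if_pos hgood] at h
        simp only [Option.some.injEq, Prod.mk.injEq] at h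
        exact h.2.symm
      · rw [if_neg hgood] at h
        cases h

lemma pvJoin_eq_nil (p : List Char) (l : List (List Char)) :
    PySem.Chars.join ['-'] (p :: l) = [] → p = [] ∧ l = [] := by
  intro h
  cases l with
  | nil => rw [PySem.Chars.join_singleton] at h; exact ⟨h, rfl⟩
  | cons q l' =>
    rw [PySem.Chars.join_cons_cons] at h
    simp at h

-- the loop of A finds the greatest pvFound index in [1, k]
lemma pvCondA_iff (cs : List Char) (i : Nat) : pvCondA cs i = true ↔ pvFound cs i := by
  simp only [pvCondA, pvFound, Bool.and_eq_true, beq_iff_eq, decide_eq_true_eq,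
    PySem.List.pyGetD_natCast]
  tauto

lemma pvLoopA_none (cs : List Char) : ∀ k, (∀ i, 1 ≤ i → i ≤ k → ¬ pvFound cs i) →
    pvLoopA cs k = none := by
  intro k
  induction k with
  | zero => intro _; rfl
  | succ k ih =>
    intro h
    simp only [pvLoopA]
    rw [if_neg]
    · exact ih fun i h1 h2 => h i h1 (by omega)
    · intro hc
      exact h (k + 1) (by omega) (by omega) ((pvCondA_iff cs (k + 1)).1 hc)

lemma pvLoopA_some (cs : List Char) : ∀ k i, 1 ≤ i → i ≤ k → pvFound cs i →
    (∀ j, i < j → ¬ pvFound cs j) → pvLoopA cs k = some i := by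
  intro k
  induction k with
  | zero => intro i h1 h2 _ _; omega
  | succ k ih =>
    intro i h1 h2 hF hMax
    simp only [pvLoopA]
    by_cases hik : i = k + 1
    · subst hik
      rw [if_pos ((pvCondA_iff cs (k + 1)).2 hF)]
    · rw [if_neg]
      · exact ih i h1 (by omega) hF hMax
      · intro hc
        exact hMax (k + 1) (by omega) ((pvCondA_iff cs (k + 1)).1 hc)

-- ===== VERDICT (by name: the statement is the Claim_ definition above) =====
theorem parse_remote_info_py_spec : Claim_equal_parse_remote_info_py := by
  intro s _
  unfold Spec_parse_remote_info_py parse_remote_info_py parse_remote_info_py_alt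
  by_cases hguard : s.toList = [] ∨ PySem.Chars.isIn ['-'] s.toList = false
  · simp only [hguard, if_true]
  · simp only [hguard, if_false]
    obtain ⟨hne, hin⟩ := not_or.1 hguard
    have hin' : PySem.Chars.isIn ['-'] s.toList = true := by
      cases h : PySem.Chars.isIn ['-'] s.toList
      · exact absurd h hin
      · rfl
    have hmem : '-' ∈ s.toList := by
      have := (PySem.Chars.isIn_iff_infix ['-'] s.toList).1 hin'
      exact (List.singleton_infix_iff '-' s.toList).1 this
    obtain ⟨f, R, hf, hcs, hsp⟩ := pvSp_decomp s.toList hmem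
    have hparts : PySem.Chars.splitOn s.toList ['-'] = f :: pvSp R := by
      rw [pvSplitOn_eq]; exact hsp
    have hrestne : pvSp R ≠ [] := pvSp_ne_nil R
    have hfree : ∀ t ∈ pvSp R, '-' ∉ t := pvSp_hyphen_free R
    have hJrest : PySem.Chars.join ['-'] (pvSp R) = R := pvJoin_pvSp R
    have hG : pvG s.toList =
        match pvSplitTokens (pvSp R) with
        | some (l, r) => some (PySem.Chars.join ['-'] (f :: l), PySem.Chars.join ['-'] r)
        | none => none := by
      rw [hcs]
      conv_lhs => rw [← hJrest]
      exact pvMain (pvSp R) hrestne hfree f hf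
    rw [hparts]
    simp only [List.headD_cons, List.tail_cons]
    cases hs : pvSplitTokens (pvSp R) with
    | none =>
      rw [hs] at hG
      have hloop : pvLoopA s.toList (s.toList.length - 1) = none :=
        pvLoopA_none s.toList _ fun i _ _ => (pvG_none s.toList).1 hG i
      rw [hloop]
      have hmax : PySem.Chars.splitOnMax s.toList ['-'] 1 = [f, R] := by
        rw [hcs]; exact pvSplitOnMax_eq f R hf
      rw [hmax]
      simp [PySem.List.pyGetD, PySem.List.pyGet?, PySem.List.pyIdx?, hJrest]
    | some p =>
      obtain ⟨l, r⟩ := p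
      rw [hs] at hG
      by_cases hd : PySem.Chars.join ['-'] (f :: l) = []
      · obtain ⟨hfnil, hlnil⟩ := pvJoin_eq_nil f l hd
        subst hfnil; subst hlnil
        have hr : r = pvSp R := pvSplitTokens_nil_left (pvSp R) r hs
        obtain ⟨hF0, _, ht0, hMax0⟩ := pvG_some s.toList [] _ (hd ▸ hG)
        have hloop : pvLoopA s.toList (s.toList.length - 1) = none :=
          pvLoopA_none s.toList _ fun i h1 _ => hMax0 i (by simpa using h1)
        rw [hloop]
        have hmax : PySem.Chars.splitOnMax s.toList ['-'] 1 = [[], R] := by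
          rw [hcs]; exact pvSplitOnMax_eq [] R (by simp)
        rw [hmax]
        simp [PySem.List.pyGetD, PySem.List.pyGet?, PySem.List.pyIdx?, PySem.Chars.join_singleton,
          hr, hJrest]
      · obtain ⟨hF, hTake, hDrop, hMax⟩ := pvG_some s.toList _ _ hG
        have hlen1 : 1 ≤ (PySem.Chars.join ['-'] (f :: l)).length := by
          cases h : PySem.Chars.join ['-'] (f :: l) with
          | nil => exact absurd h hd
          | cons a b => simp
        have hloop : pvLoopA s.toList (s.toList.length - 1) = some (PySem.Chars.join ['-'] (f :: l)).length := by
          apply pvLoopA_some s.toList _ _ hlen1 (by have := hF.1; omega) hF hMax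
        rw [hloop]
        simp only [PySem.List.slice_to_natCast, PySem.List.slice_from_natCast]
        rw [← hTake, ← hDrop]
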